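-- pv_equiv track=rewrite | github.com/Hsword/Hetu | tools/Hetu-Galvatron/galvatron/core/profiler.py | generate_allreduce_groups
-- ===== SOURCE A (Python) =====
-- def generate_allreduce_groups(world_size, allreduce_size, allreduce_consec):
--     allreduce_size = int(allreduce_size)
--     num_allreduce_groups = int(world_size // allreduce_size)
--     allreduce_groups = []
--     for i in range(num_allreduce_groups):
--         if allreduce_consec:
--             ranks = list(range(i * allreduce_size, (i+1) * allreduce_size))
--         else:
--             ranks = list(range(i, world_size, num_allreduce_groups))
--         allreduce_groups.append(ranks)
--     return allreduce_groups
-- ===== SOURCE B (Python) =====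
-- def generate_allreduce_groups(world_size, allreduce_size, allreduce_consec):
--     allreduce_size = int(allreduce_size)
--     num_allreduce_groups = int(world_size // allreduce_size)
--     if num_allreduce_groups <= 0:
--         return []
--     groups = [[] for _ in range(num_allreduce_groups)]
--     limit = num_allreduce_groups * allreduce_size
--     for rank in range(world_size):
--         if allreduce_consec:
--             if rank < limit:
--                 groups[rank // allreduce_size].append(rank)
--         else:
--             groups[rank % num_allreduce_groups].append(rank)
--     return groups
-- ===== Notes on version B (the rewrite author's own statement) =====
-- stated objective: alternative
-- what changed: Replaces the per-group construction of a fresh range per bucket by a single scatter pass over all ranks that appends each rank to its bucket (rank//size for consecutive, rank%num_groups for strided), after allocating the buckets up front.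
import Mathlib
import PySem

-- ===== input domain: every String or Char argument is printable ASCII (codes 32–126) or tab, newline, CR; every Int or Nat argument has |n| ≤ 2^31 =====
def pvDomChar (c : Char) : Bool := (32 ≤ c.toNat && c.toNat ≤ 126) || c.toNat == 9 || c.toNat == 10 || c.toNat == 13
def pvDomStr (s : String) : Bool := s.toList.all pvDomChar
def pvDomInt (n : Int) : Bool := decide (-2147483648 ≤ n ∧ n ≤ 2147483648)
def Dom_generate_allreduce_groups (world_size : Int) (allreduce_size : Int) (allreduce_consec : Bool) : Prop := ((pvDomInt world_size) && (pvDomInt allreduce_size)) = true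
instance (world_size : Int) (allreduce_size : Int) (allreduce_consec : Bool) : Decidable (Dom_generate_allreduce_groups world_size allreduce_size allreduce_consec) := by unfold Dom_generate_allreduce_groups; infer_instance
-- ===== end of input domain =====

-- B builds the result by a single scatter pass over the ranks into pre-allocated buckets instead of
-- constructing one range per group; same return value (objective: alternative decomposition, not faster).

-- ===== PORT A =====
def generate_allreduce_groups (world_size : Int) (allreduce_size : Int) (allreduce_consec : Bool) : List (List Int) :=
  let num_allreduce_groups := PySem.Int.floordiv world_size allreduce_size
  (PySem.List.pyRange 0 num_allreduce_groups 1).foldl (fun allreduce_groups i =>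
    let ranks := if allreduce_consec then
        PySem.List.pyRange (i * allreduce_size) ((i + 1) * allreduce_size) 1
      else
        PySem.List.pyRange i world_size num_allreduce_groups
    allreduce_groups ++ [ranks]) []

-- ===== PORT B =====
-- (the bucket index is nonnegative on every executed iteration — rank ≥ 0 and the positive-count
--  guard — so `.toNat` is exact here)
def generate_allreduce_groups_alt (world_size : Int) (allreduce_size : Int) (allreduce_consec : Bool) : List (List Int) :=
  let num_allreduce_groups := PySem.Int.floordiv world_size allreduce_size
  if num_allreduce_groups ≤ 0 then []
  else
    let limit := num_allreduce_groups * allreduce_size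
    (PySem.List.pyRange 0 world_size 1).foldl (fun groups rank =>
      if allreduce_consec then
        if rank < limit then
          groups.modify (PySem.Int.floordiv rank allreduce_size).toNat (· ++ [rank])
        else groups
      else
        groups.modify (PySem.Int.mod rank num_allreduce_groups).toNat (· ++ [rank]))
      (List.replicate num_allreduce_groups.toNat [])

-- ===== PRECONDITION & SPEC =====
-- Pre_ excludes exactly allreduce_size = 0, where Python A raises ZeroDivisionError.
def Pre_generate_allreduce_groups (world_size : Int) (allreduce_size : Int) (allreduce_consec : Bool) : Prop := allreduce_size ≠ 0
instance (world_size : Int) (allreduce_size : Int) (allreduce_consec : Bool) : Decidable (Pre_generate_allreduce_groups world_size allreduce_size allreduce_consec) := by unfold Pre_generate_allreduce_groups; infer_instance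

def pvWitness_generate_allreduce_groups : Int × Int × Bool := (8, 2, true)

def Spec_generate_allreduce_groups (world_size : Int) (allreduce_size : Int) (allreduce_consec : Bool) (out : List (List Int)) : Prop := out = generate_allreduce_groups_alt world_size allreduce_size allreduce_consec
instance (world_size : Int) (allreduce_size : Int) (allreduce_consec : Bool) (out : List (List Int)) : Decidable (Spec_generate_allreduce_groups world_size allreduce_size allreduce_consec out) := by unfold Spec_generate_allreduce_groups; infer_instance

-- ===== CLAIM (what is proved, stated in full; the proofs are below) =====
def Claim_equal_generate_allreduce_groups : Prop := ∀ (world_size : Int) (allreduce_size : Int) (allreduce_consec : Bool), Dom_generate_allreduce_groups world_size allreduce_size allreduce_consec → Pre_generate_allreduce_groups world_size allreduce_size allreduce_consec → Spec_generate_allreduce_groups world_size allreduce_size allreduce_consec (generate_allreduce_groups world_size allreduce_size allreduce_consec)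

-- ===== LEMMAS AND PROOFS =====

-- Two strictly increasing integer lists with the same members are equal.
theorem pvEqOfMemIffPairwiseLt : ∀ (l₁ l₂ : List Int), l₁.Pairwise (· < ·) → l₂.Pairwise (· < ·) →
    (∀ x, x ∈ l₁ ↔ x ∈ l₂) → l₁ = l₂ := by
  intro l₁
  induction l₁ with
  | nil =>
    intro l₂ _ _ hmem
    cases l₂ with
    | nil => rfl
    | cons y ys => exact absurd ((hmem y).2 (by simp)) (by simp)
  | cons x xs ih =>
    intro l₂ h₁ h₂ hmem
    cases l₂ with
    | nil => exact absurd ((hmem x).1 (by simp)) (by simp)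
    | cons y ys =>
      have hxy : x = y := by
        have hx : x ∈ y :: ys := (hmem x).1 (by simp)
        have hy : y ∈ x :: xs := (hmem y).2 (by simp)
        rcases List.mem_cons.1 hx with h | h
        · exact h
        · rcases List.mem_cons.1 hy with h' | h'
          · exact h'.symm
          · have := (List.pairwise_cons.1 h₁).1 y h'
            have := (List.pairwise_cons.1 h₂).1 x h
            omega
      subst hxy
      have htail : ∀ z, z ∈ xs ↔ z ∈ ys := by
        intro z
        constructor
        · intro hz
          have hzx : x < z := (List.pairwise_cons.1 h₁).1 z hz
          rcases List.mem_cons.1 ((hmem z).1 (List.mem_cons_of_mem _ hz)) with h | h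
          · omega
          · exact h
        · intro hz
          have hzx : x < z := (List.pairwise_cons.1 h₂).1 z hz
          rcases List.mem_cons.1 ((hmem z).2 (List.mem_cons_of_mem _ hz)) with h | h
          · omega
          · exact h
      rw [ih ys (List.pairwise_cons.1 h₁).2 (List.pairwise_cons.1 h₂).2 htail]

-- The scatter fold: bucket j of the result is bucket j of the start followed by the
-- elements of xs whose index is j, in order.
theorem pvScatterGetElem? (f : Int → Nat) (xs : List Int) : ∀ (g0 : List (List Int)) (j : Nat),
    (xs.foldl (fun g x => g.modify (f x) (· ++ [x])) g0)[j]? =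
      g0[j]?.map (· ++ xs.filter (fun x => decide (f x = j))) := by
  induction xs with
  | nil => intro g0 j; simp
  | cons x xs ih =>
    intro g0 j
    simp only [List.foldl_cons, ih, List.getElem?_modify, List.filter_cons]
    cases hg : g0[j]? with
    | none => simp
    | some b =>
      by_cases hfx : f x = j
      · simp [hfx]
      · have : ¬ (decide (f x = j) = true) := by simp [hfx]
        simp [hfx]

-- pyRange with positive step is strictly increasing.
theorem pvPairwiseLtPyRangePos (a b : Int) {s : Int} (hs : 0 < s) :
    (PySem.List.pyRange a b s).Pairwise (· < ·) := by
  rw [PySem.List.pyRange_of_pos a b hs]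
  refine List.pairwise_map.2 ?_
  refine List.Pairwise.imp ?_ (List.pairwise_lt_range)
  intro m n h
  have : s * (m : Int) < s * (n : Int) := by
    apply mul_lt_mul_of_pos_left _ hs
    exact_mod_cast h
  omega

-- strided bucket j collects exactly range(j, world_size, num) (num > 0, 0 ≤ j < num)
theorem pvStridedFilter (world_size num : Int) (j : Nat) (hnum : 0 < num) (hj : (j : Int) < num) :
    (PySem.List.pyRange 0 world_size 1).filter
        (fun r => decide ((PySem.Int.mod r num).toNat = j)) =
      PySem.List.pyRange (j : Int) world_size num := by
  apply pvEqOfMemIffPairwiseLt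
  · exact (PySem.List.pairwise_lt_pyRange_one 0 world_size).filter _
  · exact pvPairwiseLtPyRangePos _ _ hnum
  · intro r
    rw [List.mem_filter, PySem.List.mem_pyRange_one, PySem.List.mem_pyRange_iff_of_pos hnum]
    simp only [decide_eq_true_eq]
    constructor
    · rintro ⟨⟨h0, hws⟩, hmod⟩
      have hmn : 0 ≤ PySem.Int.mod r num := PySem.Int.mod_nonneg r hnum
      have hmj : PySem.Int.mod r num = (j : Int) := by omega
      have hdiv := PySem.Int.floordiv_mul_add_mod r num
      have hq : 0 ≤ PySem.Int.floordiv r num := by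
        rw [PySem.Int.floordiv_eq_ediv_of_pos hnum]
        exact Int.ediv_nonneg h0 (le_of_lt hnum)
      have hr : r - (j : Int) = num * PySem.Int.floordiv r num := by rw [mul_comm]; omega
      refine ⟨by nlinarith, hws, ⟨PySem.Int.floordiv r num, hr⟩⟩
    · rintro ⟨hjr, hws, ⟨k, hk⟩⟩
      have hj0 : (0 : Int) ≤ (j : Int) := Int.natCast_nonneg j
      have h0 : (0 : Int) ≤ r := by omega
      -- mod r num and j are both in [0, num) and congruent modulo num, hence equal
      have : PySem.Int.mod r num = (j : Int) := by
        rw [PySem.Int.mod_eq_emod_of_pos hnum]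
        have h1 : (r - (j : Int)) % num = 0 := Int.emod_eq_zero_of_dvd ⟨k, hk⟩
        have h2 : r % num = (j : Int) % num := Int.emod_eq_emod_iff_emod_sub_eq_zero.mpr h1
        rw [h2, Int.emod_eq_of_lt hj0 hj]
      exact ⟨⟨h0, hws⟩, by omega⟩

-- consecutive bucket j collects exactly range(j*size, (j+1)*size) (size > 0, 0 ≤ j < num)
theorem pvConsecFilter (size num : Int) (j : Nat) (hsz : 0 < size) (hj : (j : Int) < num) :
    (PySem.List.pyRange 0 (num * size) 1).filter
        (fun r => decide ((PySem.Int.floordiv r size).toNat = j)) =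
      PySem.List.pyRange ((j : Int) * size) (((j : Int) + 1) * size) 1 := by
  apply pvEqOfMemIffPairwiseLt
  · exact (PySem.List.pairwise_lt_pyRange_one 0 (num * size)).filter _
  · exact PySem.List.pairwise_lt_pyRange_one _ _
  · intro r
    rw [List.mem_filter, PySem.List.mem_pyRange_one, PySem.List.mem_pyRange_one]
    simp only [decide_eq_true_eq]
    constructor
    · rintro ⟨⟨h0, hlim⟩, hfd⟩
      have hq : 0 ≤ PySem.Int.floordiv r size := by
        rw [PySem.Int.floordiv_eq_ediv_of_pos hsz]
        exact Int.ediv_nonneg h0 (le_of_lt hsz)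
      have hfj : PySem.Int.floordiv r size = (j : Int) := by omega
      have := (PySem.Int.floordiv_eq_iff_of_pos hsz).1 hfj
      exact ⟨this.1, this.2⟩
    · rintro ⟨hlo, hhi⟩
      have hfj : PySem.Int.floordiv r size = (j : Int) :=
        (PySem.Int.floordiv_eq_iff_of_pos hsz).2 ⟨hlo, hhi⟩
      have h0 : (0 : Int) ≤ r := le_trans (mul_nonneg (Int.natCast_nonneg j) hsz.le) hlo
      have hlim : r < num * size := by nlinarith
      exact ⟨⟨h0, hlim⟩, by omega⟩

theorem generate_allreduce_groups_strided (world_size allreduce_size : Int)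
    (hnum : 0 < PySem.Int.floordiv world_size allreduce_size) :
    generate_allreduce_groups world_size allreduce_size false =
      generate_allreduce_groups_alt world_size allreduce_size false := by
  simp only [generate_allreduce_groups, generate_allreduce_groups_alt, Bool.false_eq_true,
    if_false, if_neg (not_le.mpr hnum)]
  set num := PySem.Int.floordiv world_size allreduce_size with hnumdef
  rw [PySem.List.foldl_append_singleton_eq_map, List.nil_append]
  apply List.ext_getElem?
  intro j
  rw [pvScatterGetElem? (fun r => (PySem.Int.mod r num).toNat), List.getElem?_map,
    PySem.List.getElem?_pyRange_one, List.getElem?_replicate]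
  by_cases hj : j < num.toNat
  · rw [if_pos (by omega : j < (num - 0).toNat), if_pos hj]
    simp only [Option.map_some, zero_add, List.nil_append]
    rw [pvStridedFilter world_size num j hnum (by omega : (j : Int) < num)]
  · rw [if_neg (by omega : ¬ j < (num - 0).toNat), if_neg hj]
    rfl

theorem generate_allreduce_groups_consec (world_size allreduce_size : Int)
    (hpre : allreduce_size ≠ 0)
    (hnum : 0 < PySem.Int.floordiv world_size allreduce_size) :
    generate_allreduce_groups world_size allreduce_size true =
      generate_allreduce_groups_alt world_size allreduce_size true := by
  have hdiv := PySem.Int.floordiv_mul_add_mod world_size allreduce_size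
  simp only [generate_allreduce_groups, generate_allreduce_groups_alt, if_true,
    if_neg (not_le.mpr hnum)]
  set num := PySem.Int.floordiv world_size allreduce_size with hnumdef
  rw [PySem.List.foldl_append_singleton_eq_map, List.nil_append,
    PySem.List.foldl_ite_eq_foldl_filter (fun r => r < num * allreduce_size)]
  rcases lt_or_gt_of_ne hpre with has | has
  · -- allreduce_size < 0 together with a positive group count forces world_size < 0:
    -- every range on either side is empty
    have hbounds := PySem.Int.mod_neg_bounds (a := world_size) has
    have hws : world_size < 0 := by nlinarith [hbounds.1, hbounds.2]
    rw [PySem.List.pyRange_one_eq_nil (le_of_lt hws), List.filter_nil, List.foldl_nil]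
    apply List.ext_getElem?
    intro j
    rw [List.getElem?_map, PySem.List.getElem?_pyRange_one, List.getElem?_replicate]
    by_cases hj : j < num.toNat
    · rw [if_pos (by omega : j < (num - 0).toNat), if_pos hj]
      simp only [Option.map_some, zero_add]
      congr 1
      exact PySem.List.pyRange_one_eq_nil (by nlinarith [Int.natCast_nonneg j])
    · rw [if_neg (by omega : ¬ j < (num - 0).toNat), if_neg hj]
      rfl
  · -- allreduce_size > 0: the guard keeps exactly the first num * allreduce_size ranks
    have hlim0 : (0 : Int) ≤ num * allreduce_size := mul_nonneg (le_of_lt hnum) (le_of_lt has)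
    have hmn := PySem.Int.mod_nonneg world_size has
    have hlimws : num * allreduce_size ≤ world_size := by omega
    have h1 : (PySem.List.pyRange 0 (num * allreduce_size) 1).filter
        (fun r => decide (r < num * allreduce_size)) =
        PySem.List.pyRange 0 (num * allreduce_size) 1 := by
      apply List.filter_eq_self.mpr
      intro a ha
      rw [PySem.List.mem_pyRange_one] at ha
      simpa using ha.2
    have h2 : (PySem.List.pyRange (num * allreduce_size) world_size 1).filter
        (fun r => decide (r < num * allreduce_size)) = [] := by
      apply List.filter_eq_nil_iff.mpr
      intro a ha
      rw [PySem.List.mem_pyRange_one] at ha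
      simpa using ha.1
    rw [PySem.List.pyRange_one_append 0 (num * allreduce_size) world_size hlim0 hlimws,
      List.filter_append, h1, h2, List.append_nil]
    apply List.ext_getElem?
    intro j
    rw [pvScatterGetElem? (fun r => (PySem.Int.floordiv r allreduce_size).toNat),
      List.getElem?_map, PySem.List.getElem?_pyRange_one, List.getElem?_replicate]
    by_cases hj : j < num.toNat
    · rw [if_pos (by omega : j < (num - 0).toNat), if_pos hj]
      simp only [Option.map_some, zero_add, List.nil_append]
      rw [pvConsecFilter allreduce_size num j has (by omega : (j : Int) < num)]
    · rw [if_neg (by omega : ¬ j < (num - 0).toNat), if_neg hj]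
      rfl

theorem generate_allreduce_groups_spec_aux (world_size allreduce_size : Int) (allreduce_consec : Bool)
    (hpre : allreduce_size ≠ 0) :
    generate_allreduce_groups world_size allreduce_size allreduce_consec =
      generate_allreduce_groups_alt world_size allreduce_size allreduce_consec := by
  by_cases hnum : PySem.Int.floordiv world_size allreduce_size ≤ 0
  · simp only [generate_allreduce_groups, generate_allreduce_groups_alt, if_pos hnum,
      PySem.List.pyRange_one_eq_nil hnum, List.foldl_nil]
  · rw [not_le] at hnum
    cases allreduce_consec with
    | false => exact generate_allreduce_groups_strided world_size allreduce_size hnum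
    | true => exact generate_allreduce_groups_consec world_size allreduce_size hpre hnum

-- ===== VERDICT (by name: the statement is the Claim_ definition above) =====
theorem generate_allreduce_groups_spec : Claim_equal_generate_allreduce_groups := by
  intro world_size allreduce_size allreduce_consec _ hpre
  exact generate_allreduce_groups_spec_aux world_size allreduce_size allreduce_consec hpre
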